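-- pv_equiv track=rewrite | github.com/lemerleau/CubicPuzzle | test/cubicgame_test.py | getFaceBetter
-- ===== SOURCE A (Python) =====
-- import itertools
--
-- def getFaceBetter(node, k) :
--     faces = []
--
--     d = len(node)
--
--     for tpl in list(itertools.combinations(range(d), k)):
--         v = list(node)
--         for i in tpl :
--             v [i] = '*'
--         faces +=[v]
--
--     return faces
-- ===== SOURCE B (Python) =====
-- def getFaceBetter(node, k):
--     # Recursive decomposition over suffixes with a star budget instead of itertools.combinations.
--     d = len(node)
--
--     def suffixes(i, b):
--         # all masked copies of node[i:] containing exactly b stars, lexicographic by star positions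
--         if b == 0:
--             return [list(node[i:])]
--         if b < 0 or d - i < b:
--             return []
--         star = [['*'] + t for t in suffixes(i + 1, b - 1)]
--         keep = [[node[i]] + t for t in suffixes(i + 1, b)]
--         return star + keep
--
--     return suffixes(0, k)
-- ===== Notes on version B (the rewrite author's own statement) =====
-- stated objective: alternative
-- what changed: Replaces itertools.combinations over index tuples plus copy-and-overwrite with a direct recursion over suffixes carrying a star budget, building each masked face front-to-back.
import Mathlib
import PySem

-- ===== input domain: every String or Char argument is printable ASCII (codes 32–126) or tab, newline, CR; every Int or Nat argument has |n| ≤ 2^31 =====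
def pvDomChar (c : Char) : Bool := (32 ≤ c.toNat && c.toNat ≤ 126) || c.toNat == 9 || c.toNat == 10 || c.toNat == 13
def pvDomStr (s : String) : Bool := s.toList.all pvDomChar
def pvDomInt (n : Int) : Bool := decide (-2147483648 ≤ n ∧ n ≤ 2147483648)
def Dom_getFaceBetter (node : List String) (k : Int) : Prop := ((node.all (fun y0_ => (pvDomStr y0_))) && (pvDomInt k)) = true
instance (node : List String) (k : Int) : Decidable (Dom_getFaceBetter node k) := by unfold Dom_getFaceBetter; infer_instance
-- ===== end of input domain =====

-- B replaces itertools.combinations over index tuples with a direct recursion over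
-- suffixes carrying a star budget (alternative decomposition, same output order).


-- ===== PORT A =====
-- itertools.combinations(l, k) in lexicographic order (hand port, exact for k ≥ 0)
def pvCombos : List Nat → Nat → List (List Nat)
  | _, 0 => [[]]
  | [], _ + 1 => []
  | x :: xs, n + 1 => (pvCombos xs n).map (List.cons x) ++ pvCombos xs (n + 1)

-- v[i] = '*' with i drawn from range(d) is always in range, so List.set is exact
def getFaceBetter (node : List String) (k : Int) : List (List String) :=
  if k < 0 then []  -- Python raises ValueError here; excluded by Pre_
  else (pvCombos (List.range node.length) k.toNat).map
    (fun tpl => tpl.foldl (fun v i => v.set i "*") node)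

-- ===== PORT B =====
-- Source B's suffixes(i, b), recursing on the suffix node[i:] directly
def pvSuffixes : List String → Int → List (List String)
  | [], b => if b = 0 then [[]] else []
  | x :: rest, b =>
    if b = 0 then [x :: rest]
    else if b < 0 ∨ ((rest.length : Int) + 1) < b then []
    else (pvSuffixes rest (b - 1)).map (List.cons "*")
         ++ (pvSuffixes rest b).map (List.cons x)

def getFaceBetter_alt (node : List String) (k : Int) : List (List String) :=
  pvSuffixes node k

-- ===== PRECONDITION & SPEC =====
-- A raises ValueError when k < 0 (itertools.combinations rejects negative r); Pre_ excludes exactly that.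
def Pre_getFaceBetter (node : List String) (k : Int) : Prop := 0 ≤ k
instance (node : List String) (k : Int) : Decidable (Pre_getFaceBetter node k) := by unfold Pre_getFaceBetter; infer_instance
def pvWitness_getFaceBetter : List String × Int := (["a", "b", "c"], 2)

def Spec_getFaceBetter (node : List String) (k : Int) (out : List (List String)) : Prop := out = getFaceBetter_alt node k
instance (node : List String) (k : Int) (out : List (List String)) : Decidable (Spec_getFaceBetter node k out) := by unfold Spec_getFaceBetter; infer_instance

-- ===== CLAIM (what is proved, stated in full; the proofs are below) =====
def Claim_equal_getFaceBetter : Prop := ∀ (node : List String) (k : Int), Dom_getFaceBetter node k → Pre_getFaceBetter node k → Spec_getFaceBetter node k (getFaceBetter node k)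

-- ===== LEMMAS AND PROOFS =====

theorem pvCombos_map (f : Nat → Nat) :
    ∀ (l : List Nat) (k : Nat), pvCombos (l.map f) k = (pvCombos l k).map (List.map f) := by
  intro l
  induction l with
  | nil => intro k; cases k <;> simp [pvCombos]
  | cons x xs ih =>
    intro k
    cases k with
    | zero => simp [pvCombos]
    | succ n => simp [pvCombos, ih, Function.comp_def]

theorem pvCombos_big : ∀ (l : List Nat) (k : Nat), l.length < k → pvCombos l k = [] := by
  intro l
  induction l with
  | nil => intro k h; cases k with
    | zero => omega
    | succ n => simp [pvCombos]
  | cons x xs ih =>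
    intro k h
    cases k with
    | zero => simp at h
    | succ n =>
      simp at h
      simp [pvCombos, ih n (by omega), ih (n+1) (by omega)]

theorem foldl_set_succ : ∀ (tpl : List Nat) (x : String) (xs : List String),
    (tpl.map Nat.succ).foldl (fun v i => v.set i "*") (x :: xs)
      = x :: tpl.foldl (fun v i => v.set i "*") xs := by
  intro tpl
  induction tpl with
  | nil => intro x xs; simp
  | cons i t ih => intro x xs; simp [List.foldl_cons, ih]

theorem main_lemma : ∀ (xs : List String) (k : Nat),
    (pvCombos (List.range xs.length) k).map
        (fun tpl => tpl.foldl (fun v i => v.set i "*") xs)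
      = pvSuffixes xs (k : Int) := by
  intro xs
  induction xs with
  | nil =>
    intro k
    cases k with
    | zero => simp [pvCombos, pvSuffixes]
    | succ n =>
      simp [pvCombos, pvSuffixes]
      omega
  | cons x xs ih =>
    intro k
    cases k with
    | zero => simp [pvCombos, pvSuffixes]
    | succ n =>
      by_cases hbig : xs.length + 1 < n + 1
      · rw [pvCombos_big _ _ (by simpa using hbig)]
        simp only [pvSuffixes]
        rw [if_neg (by omega), if_pos (by push_cast; omega)]
        simp
      · simp only [List.length_cons]
        rw [List.range_succ_eq_map]
        simp only [pvCombos, pvCombos_map, List.map_append, List.map_map]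
        have h1 : ∀ tpl : List Nat,
            ((0 :: tpl.map Nat.succ).foldl (fun v i => v.set i "*") (x :: xs))
              = "*" :: tpl.foldl (fun v i => v.set i "*") xs := by
          intro tpl; simp [List.foldl_cons, foldl_set_succ]
        simp only [pvSuffixes]
        rw [if_neg (by omega), if_neg (by push_cast; omega)]
        rw [show (((n : Nat) + 1 : Nat) : Int) - 1 = ((n : Nat) : Int) by push_cast; omega]
        rw [← ih n, ← ih (n + 1)]
        simp [Function.comp_def, h1, foldl_set_succ]

-- ===== VERDICT (by name: the statement is the Claim_ definition above) =====
theorem getFaceBetter_spec : Claim_equal_getFaceBetter := by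
  intro node k _ hpre
  unfold Pre_getFaceBetter at hpre
  unfold Spec_getFaceBetter getFaceBetter getFaceBetter_alt
  rw [if_neg (by omega)]
  have hk : (k.toNat : Int) = k := Int.toNat_of_nonneg hpre
  rw [← hk]
  exact main_lemma node k.toNat
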